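-- pv_equiv track=rewrite | github.com/adrianstier/Stier-sass-multiagent-2026 | orchestrator/core/cost_predictor.py | _get_cheaper_model_recommendation
-- ===== SOURCE A (Python) =====
-- from typing import Dict, Any, List, Optional, Tuple
--
-- MODEL_TIERS = {
--     "opus": {
--         "model": "claude-3-opus-20240229",
--         "input_cost_per_m": 15.00,
--         "output_cost_per_m": 75.00,
--         "capabilities": ["complex_reasoning", "creative_writing", "code_review", "architecture"],
--         "recommended_for": ["tech_lead", "security_reviewer"],
--     },
--     "sonnet": {
--         "model": "claude-sonnet-4-20250514",
--         "input_cost_per_m": 3.00,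
--         "output_cost_per_m": 15.00,
--         "capabilities": ["general", "code_generation", "analysis", "planning"],
--         "recommended_for": ["business_analyst", "project_manager", "code_reviewer", "backend_engineer", "frontend_engineer"],
--     },
--     "haiku": {
--         "model": "claude-3-haiku-20240307",
--         "input_cost_per_m": 0.25,
--         "output_cost_per_m": 1.25,
--         "capabilities": ["simple_tasks", "formatting", "extraction", "cleanup"],
--         "recommended_for": ["cleanup_agent", "design_reviewer"],
--     },
-- }
--
-- def _get_cheaper_model_recommendation(
--     task_type: str, assigned_role: str
-- ) -> Optional[str]:
--     """Get a cheaper model recommendation if appropriate."""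
--     # Check if task/role can use a cheaper model
--     for tier_name, tier_info in MODEL_TIERS.items():
--         if assigned_role in tier_info["recommended_for"]:
--             return tier_info["model"]
--
--     # Default recommendations based on task criticality
--     non_critical_tasks = ["cleanup_report", "design_review"]
--     if task_type in non_critical_tasks:
--         return MODEL_TIERS["haiku"]["model"]
--
--     return None
-- ===== SOURCE B (Python) =====
-- # Sorted parallel key/value tables built once, searched with a hand-written
-- # binary search (bisect_left style) instead of A's linear scan over the tiers.
-- from typing import Optional
--
-- MODEL_TIERS = {
--     "opus": {
--         "model": "claude-3-opus-20240229",
--         "input_cost_per_m": 15.00,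
--         "output_cost_per_m": 75.00,
--         "capabilities": ["complex_reasoning", "creative_writing", "code_review", "architecture"],
--         "recommended_for": ["tech_lead", "security_reviewer"],
--     },
--     "sonnet": {
--         "model": "claude-sonnet-4-20250514",
--         "input_cost_per_m": 3.00,
--         "output_cost_per_m": 15.00,
--         "capabilities": ["general", "code_generation", "analysis", "planning"],
--         "recommended_for": ["business_analyst", "project_manager", "code_reviewer", "backend_engineer", "frontend_engineer"],
--     },
--     "haiku": {
--         "model": "claude-3-haiku-20240307",
--         "input_cost_per_m": 0.25,
--         "output_cost_per_m": 1.25,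
--         "capabilities": ["simple_tasks", "formatting", "extraction", "cleanup"],
--         "recommended_for": ["cleanup_agent", "design_reviewer"],
--     },
-- }
--
-- # Each role belongs to exactly one tier, so a sorted (role, model) table is a
-- # faithful inversion of the scan's first-match lookup.
-- _ROLE_PAIRS = sorted(
--     ((role, info["model"]) for info in MODEL_TIERS.values() for role in info["recommended_for"]),
--     key=lambda p: p[0],
-- )
-- _ROLE_KEYS = [p[0] for p in _ROLE_PAIRS]
-- _ROLE_MODELS = [p[1] for p in _ROLE_PAIRS]
--
-- _NC_TASKS = sorted(["cleanup_report", "design_review"])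
-- _NC_MODELS = [MODEL_TIERS["haiku"]["model"]] * len(_NC_TASKS)
--
--
-- def _bsearch(keys, x):
--     """Index of the leftmost key >= x (bisect_left)."""
--     lo, hi = 0, len(keys)
--     while lo < hi:
--         mid = (lo + hi) // 2
--         if keys[mid] < x:
--             lo = mid + 1
--         else:
--             hi = mid
--     return lo
--
--
-- def _find(keys, vals, x):
--     i = _bsearch(keys, x)
--     if i < len(keys) and keys[i] == x:
--         return vals[i]
--     return None
--
--
-- def _get_cheaper_model_recommendation(task_type: str, assigned_role: str) -> Optional[str]:
--     """Get a cheaper model recommendation if appropriate."""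
--     model = _find(_ROLE_KEYS, _ROLE_MODELS, assigned_role)
--     if model is not None:
--         return model
--     return _find(_NC_TASKS, _NC_MODELS, task_type)
-- ===== Notes on version B (the rewrite author's own statement) =====
-- stated objective: alternative
-- what changed: Replaces A's per-call linear scan of the tiers with membership tests by sorted parallel key/value tables built once and a hand-written bisect_left binary search over them (roles and non-critical tasks alike).
import Mathlib
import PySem

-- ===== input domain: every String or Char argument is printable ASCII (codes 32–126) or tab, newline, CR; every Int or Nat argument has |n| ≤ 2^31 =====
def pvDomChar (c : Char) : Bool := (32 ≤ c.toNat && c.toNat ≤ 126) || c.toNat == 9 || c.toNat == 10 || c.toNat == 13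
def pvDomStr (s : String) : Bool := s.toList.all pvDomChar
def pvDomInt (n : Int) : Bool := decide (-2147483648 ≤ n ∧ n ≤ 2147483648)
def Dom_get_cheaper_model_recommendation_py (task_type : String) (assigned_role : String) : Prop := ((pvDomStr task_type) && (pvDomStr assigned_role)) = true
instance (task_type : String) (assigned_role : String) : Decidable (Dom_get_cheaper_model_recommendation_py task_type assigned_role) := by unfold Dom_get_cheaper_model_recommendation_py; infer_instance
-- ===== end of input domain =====

-- B replaces A's per-call linear scan over the tiers by binary search over sorted key/value tables (alternative algorithm; same result).

-- ===== PORT A =====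
-- MODEL_TIERS, restricted to the fields A reads ("model", "recommended_for"); the float cost
-- fields and "capabilities" are unused by A and omitted.  Entry: (tier_name, model, recommended_for).
def pvModelTiers : List (String × String × List String) :=
  [("opus", "claude-3-opus-20240229", ["tech_lead", "security_reviewer"]),
   ("sonnet", "claude-sonnet-4-20250514",
     ["business_analyst", "project_manager", "code_reviewer", "backend_engineer", "frontend_engineer"]),
   ("haiku", "claude-3-haiku-20240307", ["cleanup_agent", "design_reviewer"])]

-- the for-loop with early return: first tier whose recommended_for contains assigned_role
def pvTierLoop (tiers : List (String × String × List String)) (assigned_role : String) : Option String :=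
  match tiers with
  | [] => none
  | tier :: rest =>
      if assigned_role ∈ tier.2.2 then some tier.2.1 else pvTierLoop rest assigned_role

def get_cheaper_model_recommendation_py (task_type : String) (assigned_role : String) : Option String :=
  match pvTierLoop pvModelTiers assigned_role with
  | some m => some m
  | none =>
      if task_type ∈ ["cleanup_report", "design_review"] then some "claude-3-haiku-20240307"
      else none

-- ===== PORT B =====
-- _ROLE_PAIRS = sorted((role, model) pairs inverted from MODEL_TIERS, key = role);
-- the string sort key is taken in PySem's List-Char form (Python's str '<' = '<' on toList).
def pvRolePairs : List (String × String) :=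
  PySem.List.sorted
    (pvModelTiers.flatMap (fun info => info.2.2.map (fun role => (role, info.2.1))))
    (fun p => p.1.toList) false

def pvRoleKeys : List String := pvRolePairs.map Prod.fst
def pvRoleModels : List String := pvRolePairs.map Prod.snd

def pvNcTasks : List String :=
  PySem.List.sorted ["cleanup_report", "design_review"] (fun t => t.toList) false
def pvNcModels : List String := pvNcTasks.map (fun _ => "claude-3-haiku-20240307")

-- _bsearch: bisect_left-style while loop, with fuel (= keys.length, enough for the halving loop);
-- 'keys[mid] < x' is PySem.Chars.strLt on the toLists (exact for Python's str '<').
def pvBsearchGo : Nat → List String → String → Nat → Nat → Nat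
  | 0, _, _, lo, _ => lo
  | fuel + 1, keys, x, lo, hi =>
      if lo < hi then
        let mid := (lo + hi) / 2
        if PySem.Chars.strLt (keys.getD mid "").toList x.toList then
          pvBsearchGo fuel keys x (mid + 1) hi
        else pvBsearchGo fuel keys x lo mid
      else lo

-- _find: binary search, then check the key at the landing index
def pvFind (keys vals : List String) (x : String) : Option String :=
  let i := pvBsearchGo keys.length keys x 0 keys.length
  if i < keys.length && keys.getD i "" == x then some (vals.getD i "") else none

def get_cheaper_model_recommendation_py_alt (task_type : String) (assigned_role : String) : Option String :=
  match pvFind pvRoleKeys pvRoleModels assigned_role with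
  | some m => some m
  | none => pvFind pvNcTasks pvNcModels task_type

-- ===== PRECONDITION & SPEC =====
def Spec_get_cheaper_model_recommendation_py (task_type : String) (assigned_role : String) (out : Option String) : Prop := out = get_cheaper_model_recommendation_py_alt task_type assigned_role
instance (task_type : String) (assigned_role : String) (out : Option String) : Decidable (Spec_get_cheaper_model_recommendation_py task_type assigned_role out) := by unfold Spec_get_cheaper_model_recommendation_py; infer_instance

-- ===== CLAIM (what is proved, stated in full; the proofs are below) =====
def Claim_equal_get_cheaper_model_recommendation_py : Prop := ∀ (task_type : String) (assigned_role : String), Dom_get_cheaper_model_recommendation_py task_type assigned_role → Spec_get_cheaper_model_recommendation_py task_type assigned_role (get_cheaper_model_recommendation_py task_type assigned_role)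

-- ===== LEMMAS AND PROOFS =====

-- The sorted tables, evaluated (kernel-reducible thanks to the List-Char sort key).
theorem pv_roleKeys_eq : pvRoleKeys =
    ["backend_engineer", "business_analyst", "cleanup_agent", "code_reviewer", "design_reviewer",
     "frontend_engineer", "project_manager", "security_reviewer", "tech_lead"] := by decide

theorem pv_roleModels_eq : pvRoleModels =
    ["claude-sonnet-4-20250514", "claude-sonnet-4-20250514", "claude-3-haiku-20240307",
     "claude-sonnet-4-20250514", "claude-3-haiku-20240307", "claude-sonnet-4-20250514",
     "claude-sonnet-4-20250514", "claude-3-opus-20240229", "claude-3-opus-20240229"] := by decide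

theorem pv_ncTasks_eq : pvNcTasks = ["cleanup_report", "design_review"] := by decide

-- r differs from every key at or below a lower bound / at or above an upper bound (List-Char order)
theorem pv_ne_of_gt {r a k : List Char} (ha : a < r) (hk : k ≤ a) : r ≠ k :=
  ne_of_gt (lt_of_le_of_lt hk ha)

theorem pv_ne_of_le_lt {r a k : List Char} (h : r ≤ a) (hk : a < k) : r ≠ k :=
  ne_of_lt (lt_of_le_of_lt h hk)

-- toList-inequality transfers to String inequality
theorem pv_ne_str {r k : String} (h : r.toList ≠ k.toList) : r ≠ k :=
  fun he => h (he ▸ rfl)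

-- B's binary search over the role table agrees with A's tier scan at every role string.
theorem pv_roleFind_eq (r : String) :
    pvFind pvRoleKeys pvRoleModels r = pvTierLoop pvModelTiers r := by
  have hk := pv_roleKeys_eq
  have hm := pv_roleModels_eq
  by_cases c4 : ("design_reviewer".toList < r.toList)
  · simp at c4
    by_cases c7 : ("security_reviewer".toList < r.toList)
    · simp at c7
      by_cases c8 : ("tech_lead".toList < r.toList)
      · simp at c8
        have n0 : r ≠ "backend_engineer" := pv_ne_str (pv_ne_of_gt c8 (by decide))
        have n1 : r ≠ "business_analyst" := pv_ne_str (pv_ne_of_gt c8 (by decide))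
        have n2 : r ≠ "cleanup_agent" := pv_ne_str (pv_ne_of_gt c8 (by decide))
        have n3 : r ≠ "code_reviewer" := pv_ne_str (pv_ne_of_gt c8 (by decide))
        have n4 : r ≠ "design_reviewer" := pv_ne_str (pv_ne_of_gt c8 (by decide))
        have n5 : r ≠ "frontend_engineer" := pv_ne_str (pv_ne_of_gt c8 (by decide))
        have n6 : r ≠ "project_manager" := pv_ne_str (pv_ne_of_gt c8 (by decide))
        have n7 : r ≠ "security_reviewer" := pv_ne_str (pv_ne_of_gt c8 (by decide))
        have n8 : r ≠ "tech_lead" := pv_ne_str (pv_ne_of_gt c8 (by decide))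
        simp [pvFind, hk, hm, pvBsearchGo, PySem.Chars.strLt, pvTierLoop, pvModelTiers, c4, c7, c8, n0, n1, n2, n3, n4, n5, n6, n7, n8, n0.symm, n1.symm, n2.symm, n3.symm, n4.symm, n5.symm, n6.symm, n7.symm, n8.symm]
      · simp at c8
        have g8 := not_lt.mpr c8
        by_cases he : r = "tech_lead"
        · subst he; decide
        · have n8 : r ≠ "tech_lead" := he
          have n0 : r ≠ "backend_engineer" := pv_ne_str (pv_ne_of_gt c7 (by decide))
          have n1 : r ≠ "business_analyst" := pv_ne_str (pv_ne_of_gt c7 (by decide))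
          have n2 : r ≠ "cleanup_agent" := pv_ne_str (pv_ne_of_gt c7 (by decide))
          have n3 : r ≠ "code_reviewer" := pv_ne_str (pv_ne_of_gt c7 (by decide))
          have n4 : r ≠ "design_reviewer" := pv_ne_str (pv_ne_of_gt c7 (by decide))
          have n5 : r ≠ "frontend_engineer" := pv_ne_str (pv_ne_of_gt c7 (by decide))
          have n6 : r ≠ "project_manager" := pv_ne_str (pv_ne_of_gt c7 (by decide))
          have n7 : r ≠ "security_reviewer" := pv_ne_str (pv_ne_of_gt c7 (by decide))
          simp [pvFind, hk, hm, pvBsearchGo, PySem.Chars.strLt, pvTierLoop, pvModelTiers, c4, c7, g8, n0, n1, n2, n3, n4, n5, n6, n7, n8, n0.symm, n1.symm, n2.symm, n3.symm, n4.symm, n5.symm, n6.symm, n7.symm, n8.symm]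
    · simp at c7
      have g7 := not_lt.mpr c7
      by_cases c6 : ("project_manager".toList < r.toList)
      · simp at c6
        by_cases he : r = "security_reviewer"
        · subst he; decide
        · have n7 : r ≠ "security_reviewer" := he
          have n0 : r ≠ "backend_engineer" := pv_ne_str (pv_ne_of_gt c6 (by decide))
          have n1 : r ≠ "business_analyst" := pv_ne_str (pv_ne_of_gt c6 (by decide))
          have n2 : r ≠ "cleanup_agent" := pv_ne_str (pv_ne_of_gt c6 (by decide))
          have n3 : r ≠ "code_reviewer" := pv_ne_str (pv_ne_of_gt c6 (by decide))
          have n4 : r ≠ "design_reviewer" := pv_ne_str (pv_ne_of_gt c6 (by decide))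
          have n5 : r ≠ "frontend_engineer" := pv_ne_str (pv_ne_of_gt c6 (by decide))
          have n6 : r ≠ "project_manager" := pv_ne_str (pv_ne_of_gt c6 (by decide))
          have n8 : r ≠ "tech_lead" := pv_ne_str (pv_ne_of_le_lt c7 (by decide))
          simp [pvFind, hk, hm, pvBsearchGo, PySem.Chars.strLt, pvTierLoop, pvModelTiers, c4, g7, c6, n0, n1, n2, n3, n4, n5, n6, n7, n8, n0.symm, n1.symm, n2.symm, n3.symm, n4.symm, n5.symm, n6.symm, n7.symm, n8.symm]
      · simp at c6
        have g6 := not_lt.mpr c6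
        by_cases c5 : ("frontend_engineer".toList < r.toList)
        · simp at c5
          by_cases he : r = "project_manager"
          · subst he; decide
          · have n6 : r ≠ "project_manager" := he
            have n0 : r ≠ "backend_engineer" := pv_ne_str (pv_ne_of_gt c5 (by decide))
            have n1 : r ≠ "business_analyst" := pv_ne_str (pv_ne_of_gt c5 (by decide))
            have n2 : r ≠ "cleanup_agent" := pv_ne_str (pv_ne_of_gt c5 (by decide))
            have n3 : r ≠ "code_reviewer" := pv_ne_str (pv_ne_of_gt c5 (by decide))
            have n4 : r ≠ "design_reviewer" := pv_ne_str (pv_ne_of_gt c5 (by decide))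
            have n5 : r ≠ "frontend_engineer" := pv_ne_str (pv_ne_of_gt c5 (by decide))
            have n7 : r ≠ "security_reviewer" := pv_ne_str (pv_ne_of_le_lt c6 (by decide))
            have n8 : r ≠ "tech_lead" := pv_ne_str (pv_ne_of_le_lt c6 (by decide))
            simp [pvFind, hk, hm, pvBsearchGo, PySem.Chars.strLt, pvTierLoop, pvModelTiers, c4, g7, g6, c5, n0, n1, n2, n3, n4, n5, n6, n7, n8, n0.symm, n1.symm, n2.symm, n3.symm, n4.symm, n5.symm, n6.symm, n7.symm, n8.symm]
        · simp at c5
          have g5 := not_lt.mpr c5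
          by_cases he : r = "frontend_engineer"
          · subst he; decide
          · have n5 : r ≠ "frontend_engineer" := he
            have n0 : r ≠ "backend_engineer" := pv_ne_str (pv_ne_of_gt c4 (by decide))
            have n1 : r ≠ "business_analyst" := pv_ne_str (pv_ne_of_gt c4 (by decide))
            have n2 : r ≠ "cleanup_agent" := pv_ne_str (pv_ne_of_gt c4 (by decide))
            have n3 : r ≠ "code_reviewer" := pv_ne_str (pv_ne_of_gt c4 (by decide))
            have n4 : r ≠ "design_reviewer" := pv_ne_str (pv_ne_of_gt c4 (by decide))
            have n6 : r ≠ "project_manager" := pv_ne_str (pv_ne_of_le_lt c5 (by decide))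
            have n7 : r ≠ "security_reviewer" := pv_ne_str (pv_ne_of_le_lt c5 (by decide))
            have n8 : r ≠ "tech_lead" := pv_ne_str (pv_ne_of_le_lt c5 (by decide))
            simp [pvFind, hk, hm, pvBsearchGo, PySem.Chars.strLt, pvTierLoop, pvModelTiers, c4, g7, g6, g5, n0, n1, n2, n3, n4, n5, n6, n7, n8, n0.symm, n1.symm, n2.symm, n3.symm, n4.symm, n5.symm, n6.symm, n7.symm, n8.symm]
  · simp at c4
    have g4 := not_lt.mpr c4
    by_cases c2 : ("cleanup_agent".toList < r.toList)
    · simp at c2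
      by_cases c3 : ("code_reviewer".toList < r.toList)
      · simp at c3
        by_cases he : r = "design_reviewer"
        · subst he; decide
        · have n4 : r ≠ "design_reviewer" := he
          have n0 : r ≠ "backend_engineer" := pv_ne_str (pv_ne_of_gt c3 (by decide))
          have n1 : r ≠ "business_analyst" := pv_ne_str (pv_ne_of_gt c3 (by decide))
          have n2 : r ≠ "cleanup_agent" := pv_ne_str (pv_ne_of_gt c3 (by decide))
          have n3 : r ≠ "code_reviewer" := pv_ne_str (pv_ne_of_gt c3 (by decide))
          have n5 : r ≠ "frontend_engineer" := pv_ne_str (pv_ne_of_le_lt c4 (by decide))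
          have n6 : r ≠ "project_manager" := pv_ne_str (pv_ne_of_le_lt c4 (by decide))
          have n7 : r ≠ "security_reviewer" := pv_ne_str (pv_ne_of_le_lt c4 (by decide))
          have n8 : r ≠ "tech_lead" := pv_ne_str (pv_ne_of_le_lt c4 (by decide))
          simp [pvFind, hk, hm, pvBsearchGo, PySem.Chars.strLt, pvTierLoop, pvModelTiers, g4, c2, c3, n0, n1, n2, n3, n4, n5, n6, n7, n8, n0.symm, n1.symm, n2.symm, n3.symm, n4.symm, n5.symm, n6.symm, n7.symm, n8.symm]
      · simp at c3
        have g3 := not_lt.mpr c3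
        by_cases he : r = "code_reviewer"
        · subst he; decide
        · have n3 : r ≠ "code_reviewer" := he
          have n0 : r ≠ "backend_engineer" := pv_ne_str (pv_ne_of_gt c2 (by decide))
          have n1 : r ≠ "business_analyst" := pv_ne_str (pv_ne_of_gt c2 (by decide))
          have n2 : r ≠ "cleanup_agent" := pv_ne_str (pv_ne_of_gt c2 (by decide))
          have n4 : r ≠ "design_reviewer" := pv_ne_str (pv_ne_of_le_lt c3 (by decide))
          have n5 : r ≠ "frontend_engineer" := pv_ne_str (pv_ne_of_le_lt c3 (by decide))
          have n6 : r ≠ "project_manager" := pv_ne_str (pv_ne_of_le_lt c3 (by decide))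
          have n7 : r ≠ "security_reviewer" := pv_ne_str (pv_ne_of_le_lt c3 (by decide))
          have n8 : r ≠ "tech_lead" := pv_ne_str (pv_ne_of_le_lt c3 (by decide))
          simp [pvFind, hk, hm, pvBsearchGo, PySem.Chars.strLt, pvTierLoop, pvModelTiers, g4, c2, g3, n0, n1, n2, n3, n4, n5, n6, n7, n8, n0.symm, n1.symm, n2.symm, n3.symm, n4.symm, n5.symm, n6.symm, n7.symm, n8.symm]
    · simp at c2
      have g2 := not_lt.mpr c2
      by_cases c1 : ("business_analyst".toList < r.toList)
      · simp at c1
        by_cases he : r = "cleanup_agent"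
        · subst he; decide
        · have n2 : r ≠ "cleanup_agent" := he
          have n0 : r ≠ "backend_engineer" := pv_ne_str (pv_ne_of_gt c1 (by decide))
          have n1 : r ≠ "business_analyst" := pv_ne_str (pv_ne_of_gt c1 (by decide))
          have n3 : r ≠ "code_reviewer" := pv_ne_str (pv_ne_of_le_lt c2 (by decide))
          have n4 : r ≠ "design_reviewer" := pv_ne_str (pv_ne_of_le_lt c2 (by decide))
          have n5 : r ≠ "frontend_engineer" := pv_ne_str (pv_ne_of_le_lt c2 (by decide))
          have n6 : r ≠ "project_manager" := pv_ne_str (pv_ne_of_le_lt c2 (by decide))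
          have n7 : r ≠ "security_reviewer" := pv_ne_str (pv_ne_of_le_lt c2 (by decide))
          have n8 : r ≠ "tech_lead" := pv_ne_str (pv_ne_of_le_lt c2 (by decide))
          simp [pvFind, hk, hm, pvBsearchGo, PySem.Chars.strLt, pvTierLoop, pvModelTiers, g4, g2, c1, n0, n1, n2, n3, n4, n5, n6, n7, n8, n0.symm, n1.symm, n2.symm, n3.symm, n4.symm, n5.symm, n6.symm, n7.symm, n8.symm]
      · simp at c1
        have g1 := not_lt.mpr c1
        by_cases c0 : ("backend_engineer".toList < r.toList)
        · simp at c0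
          by_cases he : r = "business_analyst"
          · subst he; decide
          · have n1 : r ≠ "business_analyst" := he
            have n0 : r ≠ "backend_engineer" := pv_ne_str (pv_ne_of_gt c0 (by decide))
            have n2 : r ≠ "cleanup_agent" := pv_ne_str (pv_ne_of_le_lt c1 (by decide))
            have n3 : r ≠ "code_reviewer" := pv_ne_str (pv_ne_of_le_lt c1 (by decide))
            have n4 : r ≠ "design_reviewer" := pv_ne_str (pv_ne_of_le_lt c1 (by decide))
            have n5 : r ≠ "frontend_engineer" := pv_ne_str (pv_ne_of_le_lt c1 (by decide))
            have n6 : r ≠ "project_manager" := pv_ne_str (pv_ne_of_le_lt c1 (by decide))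
            have n7 : r ≠ "security_reviewer" := pv_ne_str (pv_ne_of_le_lt c1 (by decide))
            have n8 : r ≠ "tech_lead" := pv_ne_str (pv_ne_of_le_lt c1 (by decide))
            simp [pvFind, hk, hm, pvBsearchGo, PySem.Chars.strLt, pvTierLoop, pvModelTiers, g4, g2, g1, c0, n0, n1, n2, n3, n4, n5, n6, n7, n8, n0.symm, n1.symm, n2.symm, n3.symm, n4.symm, n5.symm, n6.symm, n7.symm, n8.symm]
        · simp at c0
          have g0 := not_lt.mpr c0
          by_cases he : r = "backend_engineer"
          · subst he; decide
          · have n0 : r ≠ "backend_engineer" := he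
            have n1 : r ≠ "business_analyst" := pv_ne_str (pv_ne_of_le_lt c0 (by decide))
            have n2 : r ≠ "cleanup_agent" := pv_ne_str (pv_ne_of_le_lt c0 (by decide))
            have n3 : r ≠ "code_reviewer" := pv_ne_str (pv_ne_of_le_lt c0 (by decide))
            have n4 : r ≠ "design_reviewer" := pv_ne_str (pv_ne_of_le_lt c0 (by decide))
            have n5 : r ≠ "frontend_engineer" := pv_ne_str (pv_ne_of_le_lt c0 (by decide))
            have n6 : r ≠ "project_manager" := pv_ne_str (pv_ne_of_le_lt c0 (by decide))
            have n7 : r ≠ "security_reviewer" := pv_ne_str (pv_ne_of_le_lt c0 (by decide))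
            have n8 : r ≠ "tech_lead" := pv_ne_str (pv_ne_of_le_lt c0 (by decide))
            simp [pvFind, hk, hm, pvBsearchGo, PySem.Chars.strLt, pvTierLoop, pvModelTiers, g4, g2, g1, g0, n0, n1, n2, n3, n4, n5, n6, n7, n8, n0.symm, n1.symm, n2.symm, n3.symm, n4.symm, n5.symm, n6.symm, n7.symm, n8.symm]

-- B's binary search over the task table agrees with A's fallback membership test.
theorem pv_taskFind_eq (t : String) :
    pvFind pvNcTasks pvNcModels t =
      (if t ∈ ["cleanup_report", "design_review"] then some "claude-3-haiku-20240307"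
       else (none : Option String)) := by
  have hk := pv_ncTasks_eq
  have hm : pvNcModels = ["claude-3-haiku-20240307", "claude-3-haiku-20240307"] := by decide
  by_cases h1 : ("design_review".toList < t.toList)
  · have n1 : t ≠ "design_review" := pv_ne_str (pv_ne_of_gt h1 (le_refl _))
    have n0 : t ≠ "cleanup_report" := pv_ne_str (pv_ne_of_gt h1 (by decide))
    simp at h1
    simp [pvFind, hk, hm, pvBsearchGo, PySem.Chars.strLt, h1, n1, n0, n1.symm, n0.symm]
  · by_cases h0 : ("cleanup_report".toList < t.toList)
    · by_cases he : t = "design_review"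
      · subst he; decide
      · have n1 : t ≠ "design_review" := he
        have n0 : t ≠ "cleanup_report" := pv_ne_str (pv_ne_of_gt h0 (le_refl _))
        simp at h1 h0
        have g1 := not_lt.mpr h1
        simp [pvFind, hk, hm, pvBsearchGo, PySem.Chars.strLt, g1, h0, n1, n0, n1.symm, n0.symm]
    · by_cases he : t = "cleanup_report"
      · subst he; decide
      · have n0 : t ≠ "cleanup_report" := he
        have n1 : t ≠ "design_review" := pv_ne_str (fun hc => h0 (hc ▸ (by decide : ("cleanup_report".toList < "design_review".toList))))
        simp at h1 h0
        have g1 := not_lt.mpr h1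
        have g0 := not_lt.mpr h0
        simp [pvFind, hk, hm, pvBsearchGo, PySem.Chars.strLt, g1, g0, n1, n0, n1.symm, n0.symm]

-- ===== VERDICT (by name: the statement is the Claim_ definition above) =====
theorem get_cheaper_model_recommendation_py_spec : Claim_equal_get_cheaper_model_recommendation_py := by
  intro t r _
  unfold Spec_get_cheaper_model_recommendation_py
  unfold get_cheaper_model_recommendation_py get_cheaper_model_recommendation_py_alt
  rw [pv_roleFind_eq, pv_taskFind_eq]
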